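-- pv_equiv track=rewrite | github.com/Sumaanyu-Nayak/SE-DL-Lab | firstAssign.py | mode3
-- ===== SOURCE A (Python) =====
-- def mode3(marks):
--     ret = {}
--     for i in marks:
--         if i in ret:
--             ret[i] += 1
--         else:
--             ret[i] = 1
--     maxVal = max(ret.values())
--     modearr = []
--     for i in ret:
--         if ret[i] == maxVal and ret[i]>1:
--             modearr.append(i)
--     modearr.sort()
--     return modearr
-- ===== SOURCE B (Python) =====
-- def mode3(marks):
--     s = sorted(marks)
--     runs = []
--     for x in s:
--         if runs and runs[-1][0] == x:
--             runs[-1] = (x, runs[-1][1] + 1)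
--         else:
--             runs.append((x, 1))
--     best = max(c for _, c in runs)
--     return [v for v, c in runs if c == best and c > 1]
-- ===== Notes on version B (the rewrite author's own statement) =====
-- stated objective: alternative
-- what changed: Replaces A's dict-histogram + final sort with a sort-first single sweep that groups equal consecutive elements into (value, run-length) runs, so the modal values come out already in ascending order with no final sort.
import Mathlib
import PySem

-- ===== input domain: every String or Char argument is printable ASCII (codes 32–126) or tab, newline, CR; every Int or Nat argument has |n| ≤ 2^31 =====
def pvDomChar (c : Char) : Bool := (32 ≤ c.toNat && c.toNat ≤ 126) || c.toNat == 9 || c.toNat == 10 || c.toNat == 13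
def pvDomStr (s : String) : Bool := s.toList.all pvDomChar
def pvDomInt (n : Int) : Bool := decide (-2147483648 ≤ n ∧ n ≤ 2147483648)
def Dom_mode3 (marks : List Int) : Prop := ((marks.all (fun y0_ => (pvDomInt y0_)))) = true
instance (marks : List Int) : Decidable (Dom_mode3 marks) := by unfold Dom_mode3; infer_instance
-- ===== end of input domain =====

-- B replaces A's dict histogram by sort-then-sweep run-length grouping, so the result
-- comes out already in ascending order with no final sort (objective: alternative).

-- ===== PORT A =====
def mode3 (marks : List Int) : List Int :=
  let ret := marks.foldl
    (fun d i => if d.contains i then d.insert i (d.getD i 0 + 1) else d.insert i 1)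
    (PySem.Dict.empty : PySem.Dict Int Int)
  match PySem.List.max? (PySem.Dict.values ret) (fun v => v) with
  | none => []   -- unreachable under Pre_mode3: Python's max([]) raises ValueError
  | some maxVal =>
    let modearr := (PySem.Dict.keys ret).foldl
      (fun acc i => if ret.getD i 0 = maxVal ∧ ret.getD i 0 > 1 then acc ++ [i] else acc) []
    PySem.List.sorted modearr (fun x => x) false

-- ===== PORT B =====
def mode3_alt (marks : List Int) : List Int :=
  let s := PySem.List.sorted marks (fun x => x) false
  let runs := s.foldl
    (fun runs x =>
      match runs.getLast? with
      | some p => if p.1 = x then runs.dropLast ++ [(x, p.2 + 1)] else runs ++ [(x, 1)]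
      | none => runs ++ [(x, 1)])
    ([] : List (Int × Int))
  match PySem.List.max? (runs.map (fun p => p.2)) (fun c => c) with
  | none => []   -- unreachable under Pre_mode3: Python's max over an empty generator raises ValueError
  | some best => (runs.filter (fun p => p.2 = best ∧ p.2 > 1)).map (fun p => p.1)

-- ===== PRECONDITION & SPEC =====
-- Pre_ excludes only the empty list, on which both A and B raise ValueError (max of an empty sequence).
def Pre_mode3 (marks : List Int) : Prop := marks ≠ []
instance (marks : List Int) : Decidable (Pre_mode3 marks) := by unfold Pre_mode3; infer_instance
def pvWitness_mode3 : List Int := [1, 1, 2]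

def Spec_mode3 (marks : List Int) (out : List Int) : Prop := out = mode3_alt marks
instance (marks : List Int) (out : List Int) : Decidable (Spec_mode3 marks out) := by unfold Spec_mode3; infer_instance

-- ===== CLAIM (what is proved, stated in full; the proofs are below) =====
def Claim_equal_mode3 : Prop := ∀ (marks : List Int), Dom_mode3 marks → Pre_mode3 marks → Spec_mode3 marks (mode3 marks)

-- ===== LEMMAS AND PROOFS =====

-- B's loop step, named for the proofs (identical to the lambda in mode3_alt).
def bStep (runs : List (Int × Int)) (x : Int) : List (Int × Int) :=
  match runs.getLast? with
  | some p => if p.1 = x then runs.dropLast ++ [(x, p.2 + 1)] else runs ++ [(x, 1)]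
  | none => runs ++ [(x, 1)]

-- the run decomposition B's sweep computes, as a structural recursion
def groupRuns (v c : Int) : List Int → List (Int × Int)
  | [] => [(v, c)]
  | x :: t => if x = v then groupRuns v (c + 1) t else (v, c) :: groupRuns x 1 t


theorem foldl_bStep (s : List Int) : ∀ (R : List (Int × Int)) (v c : Int),
    s.foldl bStep (R ++ [(v, c)]) = R ++ groupRuns v c s := by
  induction s with
  | nil => intro R v c; simp [groupRuns]
  | cons x t ih =>
    intro R v c
    have hstep : bStep (R ++ [(v, c)]) x =
        if v = x then R ++ [(x, c + 1)] else (R ++ [(v, c)]) ++ [(x, 1)] := by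
      simp [bStep]
    by_cases h : x = v
    · subst h
      rw [List.foldl_cons, hstep, if_pos rfl, ih R x (c + 1)]
      have hg : groupRuns x c (x :: t) = groupRuns x (c + 1) t := by simp [groupRuns]
      rw [hg]
    · rw [List.foldl_cons, hstep, if_neg (fun hh : v = x => h hh.symm), ih (R ++ [(v, c)]) x 1]
      have hg : groupRuns v c (x :: t) = (v, c) :: groupRuns x 1 t := by simp [groupRuns, h]
      rw [hg]
      simp

theorem groupRuns_fst_mem (t : List Int) : ∀ v c u,
    u ∈ (groupRuns v c t).map Prod.fst ↔ u = v ∨ u ∈ t := by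
  induction t with
  | nil => intro v c u; simp [groupRuns]
  | cons x t ih =>
    intro v c u
    by_cases h : x = v
    · subst h
      have hg : groupRuns x c (x :: t) = groupRuns x (c + 1) t := by simp [groupRuns]
      rw [hg, ih]
      simp only [List.mem_cons]
      tauto
    · have hg : groupRuns v c (x :: t) = (v, c) :: groupRuns x 1 t := by simp [groupRuns, h]
      rw [hg, List.map_cons]
      simp only [List.mem_cons, ih]

theorem groupRuns_mem (t : List Int) : ∀ v c u d, (∀ y ∈ t, v ≤ y) → t.Pairwise (· ≤ ·) →
    ((u, d) ∈ groupRuns v c t ↔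
      (u = v ∧ d = c + (t.count v : Int)) ∨ (u ≠ v ∧ u ∈ t ∧ d = (t.count u : Int))) := by
  induction t with
  | nil => intro v c u d _ _; simp [groupRuns, Prod.ext_iff]
  | cons x t ih =>
    intro v c u d h1 h2
    have hx : v ≤ x := h1 x (by simp)
    have hxt : ∀ y ∈ t, x ≤ y := (List.pairwise_cons.mp h2).1
    have h2t : t.Pairwise (· ≤ ·) := (List.pairwise_cons.mp h2).2
    by_cases hxv : x = v
    · subst hxv
      rw [groupRuns, if_pos rfl, ih x (c + 1) u d hxt h2t]
      constructor
      · rintro (⟨rfl, rfl⟩ | ⟨hne, hu, rfl⟩)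
        · left; refine ⟨rfl, ?_⟩; rw [List.count_cons_self]; push_cast; ring
        · right; refine ⟨hne, by simp [hu], ?_⟩; simp [Ne.symm hne]
      · rintro (⟨rfl, rfl⟩ | ⟨hne, hu, rfl⟩)
        · left; refine ⟨rfl, ?_⟩; rw [List.count_cons_self]; push_cast; ring
        · right
          refine ⟨hne, ?_, ?_⟩
          · rcases List.mem_cons.mp hu with rfl | h; exact absurd rfl hne; exact h
          · simp [Ne.symm hne]
    · have hvx : v < x := lt_of_le_of_ne hx (fun hh => hxv hh.symm)
      have hvt : ∀ y ∈ x :: t, v < y := by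
        intro y hy
        rcases List.mem_cons.mp hy with rfl | hy'
        · exact hvx
        · exact lt_of_lt_of_le hvx (hxt y hy')
      have hcnt : (x :: t).count v = 0 := by
        rw [List.count_eq_zero]
        intro hmem
        exact absurd rfl (ne_of_lt (hvt v hmem))
      rw [groupRuns, if_neg hxv, List.mem_cons, ih x 1 u d hxt h2t]
      constructor
      · rintro (heq | ⟨rfl, rfl⟩ | ⟨hne, hu, rfl⟩)
        · left
          have h1' : u = v := congrArg Prod.fst heq
          have h2' : d = c := congrArg Prod.snd heq
          exact ⟨h1', by rw [h2', hcnt]; push_cast; ring⟩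
        · right
          refine ⟨fun hh => hxv hh, by simp, ?_⟩
          rw [List.count_cons_self]; push_cast; ring
        · right
          have huv : u ≠ v := ne_of_gt (hvt u (by simp [hu]))
          refine ⟨huv, by simp [hu], ?_⟩
          simp [Ne.symm hne]
      · rintro (⟨rfl, rfl⟩ | ⟨hne, hu, rfl⟩)
        · left; rw [hcnt]; push_cast; simp
        · by_cases hux : u = x
          · subst hux
            right; left; refine ⟨rfl, ?_⟩
            rw [List.count_cons_self]; push_cast; ring
          · right; right
            have hut : u ∈ t := by
              rcases List.mem_cons.mp hu with rfl | h; exact absurd rfl hux; exact h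
            exact ⟨hux, hut, by simp [Ne.symm hux]⟩

theorem groupRuns_fst_sorted (t : List Int) : ∀ v c, (∀ y ∈ t, v ≤ y) → t.Pairwise (· ≤ ·) →
    ((groupRuns v c t).map Prod.fst).Pairwise (· < ·) := by
  induction t with
  | nil => intro v c _ _; simp [groupRuns]
  | cons x t ih =>
    intro v c h1 h2
    have hx : v ≤ x := h1 x (by simp)
    have hxt : ∀ y ∈ t, x ≤ y := (List.pairwise_cons.mp h2).1
    have h2t : t.Pairwise (· ≤ ·) := (List.pairwise_cons.mp h2).2
    by_cases hxv : x = v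
    · subst hxv
      rw [groupRuns, if_pos rfl]
      exact ih x (c + 1) hxt h2t
    · have hvx : v < x := lt_of_le_of_ne hx (fun hh => hxv hh.symm)
      rw [groupRuns, if_neg hxv, List.map_cons]
      refine List.pairwise_cons.mpr ⟨?_, ih x 1 hxt h2t⟩
      intro u hu
      rcases (groupRuns_fst_mem t x 1 u).mp hu with rfl | hut
      · exact hvx
      · exact lt_of_lt_of_le hvx (hxt u hut)

-- ===== VERDICT (by name: the statement is the Claim_ definition above) =====
theorem mode3_spec : Claim_equal_mode3 := by
  intro marks _ hne
  simp only [Spec_mode3, mode3, mode3_alt]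
  -- A's counting loop builds Counter(marks)
  have hret : marks.foldl
      (fun (d : PySem.Dict Int Int) (i : Int) =>
        if d.contains i then d.insert i (d.getD i 0 + 1) else d.insert i 1)
      PySem.Dict.empty = PySem.Dict.counter marks := by
    rw [PySem.List.foldl_congr_mem marks _ (fun (d : PySem.Dict Int Int) (i : Int) => d.insert i (d.getD i 0 + 1)) _ ?_]
    · exact PySem.Dict.foldl_insert_getD_add_one_eq_counter marks
    · intro d i _
      by_cases h : d.contains i
      · simp [h]
      · have hf : d.contains i = false := by simpa using h
        simp [hf, PySem.Dict.getD_of_not_contains d 0 hf]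
  have hsne : PySem.List.sorted marks (fun x => x) false ≠ [] := by
    rw [Ne, PySem.List.sorted_eq_nil_iff]; exact hne
  obtain ⟨x0, t, hs⟩ : ∃ x0 t, PySem.List.sorted marks (fun x => x) false = x0 :: t := by
    cases h : PySem.List.sorted marks (fun x => x) false with
    | nil => exact absurd h hsne
    | cons a b => exact ⟨a, b, rfl⟩
  have hpair : (x0 :: t).Pairwise (· ≤ ·) := by
    have h := PySem.List.sorted_pairwise marks (fun x => x)
    rw [hs] at h; exact h
  have hxt : ∀ y ∈ t, x0 ≤ y := (List.pairwise_cons.mp hpair).1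
  have h2t : t.Pairwise (· ≤ ·) := (List.pairwise_cons.mp hpair).2
  have hperm : (x0 :: t).Perm marks := hs ▸ PySem.List.sorted_perm marks (fun x => x) false
  -- B's sweep computes the run decomposition
  have hruns : (PySem.List.sorted marks (fun x => x) false).foldl bStep [] = groupRuns x0 1 t := by
    rw [hs, List.foldl_cons]
    have h0 : bStep [] x0 = [] ++ [(x0, 1)] := by simp [bStep]
    rw [h0, foldl_bStep t [] x0 1]
    simp
  -- runs characterization over the original list
  have hmem : ∀ u d, ((u, d) ∈ groupRuns x0 1 t) ↔ (u ∈ marks ∧ d = (marks.count u : Int)) := by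
    intro u d
    rw [groupRuns_mem t x0 1 u d hxt h2t]
    have hmm : ∀ z, z ∈ marks ↔ z ∈ x0 :: t := fun z => hperm.mem_iff.symm
    have hcc : ∀ z, marks.count z = (x0 :: t).count z := fun z => (hperm.count_eq z).symm
    constructor
    · rintro (⟨huv, hd⟩ | ⟨hne', hu, hd⟩)
      · subst huv
        refine ⟨(hmm u).mpr (by simp), ?_⟩
        rw [hd, hcc u]; simp; ring
      · refine ⟨(hmm u).mpr (by simp [hu]), ?_⟩
        rw [hd, hcc u]; simp [Ne.symm hne']
    · rintro ⟨humem, hd⟩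
      have hu' : u ∈ x0 :: t := (hmm u).mp humem
      by_cases hux : u = x0
      · left
        refine ⟨hux, ?_⟩
        rw [hd, hcc u, hux]; simp; ring
      · right
        refine ⟨hux, ?_, ?_⟩
        · rcases List.mem_cons.mp hu' with h | h
          · exact absurd h hux
          · exact h
        · rw [hd, hcc u]; simp [Ne.symm hux]
  -- A's dict values are the per-distinct-value counts
  have hvals : (PySem.Dict.counter marks).values =
      (PySem.Set.ofList marks).map (fun k => ((marks.count k : Int))) := by
    rw [PySem.Dict.values_eq_map_keys (PySem.Dict.counter marks)
          (PySem.Dict.nodup_keys_counter marks) 0,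
        PySem.Dict.keys_counter marks]
    exact List.map_congr_left (fun k _ => PySem.Dict.getD_counter marks k)
  have hvalsmem : ∀ y, y ∈ (PySem.Dict.counter marks).values ↔
      ∃ u ∈ marks, y = (marks.count u : Int) := by
    intro y; rw [hvals]
    simp [PySem.Set.mem_ofList, eq_comm]
  have hcntmem : ∀ y, y ∈ (groupRuns x0 1 t).map (fun p => p.2) ↔
      ∃ u ∈ marks, y = (marks.count u : Int) := by
    intro y
    simp only [List.mem_map]
    constructor
    · rintro ⟨⟨u, d⟩, hp, rfl⟩
      obtain ⟨hu, hd⟩ := (hmem u d).mp hp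
      exact ⟨u, hu, hd⟩
    · rintro ⟨u, hu, rfl⟩
      exact ⟨(u, (marks.count u : Int)), (hmem u _).mpr ⟨hu, rfl⟩, rfl⟩
  obtain ⟨a, ha⟩ : ∃ a, a ∈ marks := List.exists_mem_of_ne_nil marks hne
  obtain ⟨mA, hmA⟩ : ∃ mA, PySem.List.max?
      (PySem.Dict.counter marks).values (fun v => v) = some mA := by
    cases h : PySem.List.max? (PySem.Dict.counter marks).values (fun v => v) with
    | none =>
      have h0 := (PySem.List.max?_eq_none_iff _ _).mp h
      have hm := (hvalsmem _).mpr ⟨a, ha, rfl⟩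
      rw [h0] at hm
      exact absurd hm List.not_mem_nil
    | some m => exact ⟨m, rfl⟩
  obtain ⟨mB, hmB⟩ : ∃ mB, PySem.List.max?
      ((groupRuns x0 1 t).map (fun p => p.2)) (fun c => c) = some mB := by
    cases h : PySem.List.max? ((groupRuns x0 1 t).map (fun p => p.2)) (fun c => c) with
    | none =>
      have h0 := (PySem.List.max?_eq_none_iff _ _).mp h
      have hm := (hcntmem _).mpr ⟨a, ha, rfl⟩
      rw [h0] at hm
      exact absurd hm List.not_mem_nil
    | some m => exact ⟨m, rfl⟩
  have hAB : mA = mB := by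
    have h1 : mA ∈ (PySem.Dict.counter marks).values := PySem.List.max?_mem hmA
    have h2 : mB ∈ (groupRuns x0 1 t).map (fun p => p.2) := PySem.List.max?_mem hmB
    have h1' : mA ∈ (groupRuns x0 1 t).map (fun p => p.2) :=
      (hcntmem mA).mpr ((hvalsmem mA).mp h1)
    have h2' : mB ∈ (PySem.Dict.counter marks).values :=
      (hvalsmem mB).mpr ((hcntmem mB).mp h2)
    exact le_antisymm (PySem.List.max?_isMax hmB mA h1') (PySem.List.max?_isMax hmA mB h2')
  have hruns' : (PySem.List.sorted marks (fun x => x) false).foldl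
      (fun runs x =>
        match runs.getLast? with
        | some p => if p.1 = x then runs.dropLast ++ [(x, p.2 + 1)] else runs ++ [(x, 1)]
        | none => runs ++ [(x, 1)]) ([] : List (Int × Int)) = groupRuns x0 1 t := hruns
  subst hAB
  simp only [hret, hruns', hmA, hmB]
  -- A's collection loop is a filter over the dict's keys
  rw [PySem.List.foldl_append_ite_eq_filter
        (fun i => (PySem.Dict.counter marks).getD i 0 = mA ∧ (PySem.Dict.counter marks).getD i 0 > 1)
        ((PySem.Dict.counter marks).keys) [],
      List.nil_append, PySem.Dict.keys_counter marks]
  -- both final lists are the strictly-increasing list of modal values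
  have hfst : ((groupRuns x0 1 t).map Prod.fst).Pairwise (· < ·) :=
    groupRuns_fst_sorted t x0 1 hxt h2t
  have hsubl : ((((groupRuns x0 1 t).filter
        (fun p => decide (p.2 = mA ∧ p.2 > 1))).map Prod.fst)).Sublist
      ((groupRuns x0 1 t).map Prod.fst) :=
    List.Sublist.map Prod.fst (List.filter_sublist ..)
  have hpB : (((groupRuns x0 1 t).filter
      (fun p => decide (p.2 = mA ∧ p.2 > 1))).map Prod.fst).Pairwise (· < ·) :=
    List.Pairwise.sublist hsubl hfst
  apply PySem.List.sorted_eq_of_perm_of_pairwise_lt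
  · refine (List.perm_ext_iff_of_nodup (hpB.imp (fun h => ne_of_lt h)) ?_).mpr ?_
    · exact List.Nodup.filter _ (PySem.Set.nodup_ofList marks)
    · intro y
      simp only [List.mem_map, List.mem_filter, PySem.Set.mem_ofList, decide_eq_true_eq,
        PySem.Dict.getD_counter]
      constructor
      · rintro ⟨⟨u, d⟩, ⟨hp, hq1, hq2⟩, rfl⟩
        obtain ⟨hu, hd⟩ := (hmem u d).mp hp
        subst hd
        exact ⟨hu, hq1, hq2⟩
      · rintro ⟨hy, h1, h2⟩
        exact ⟨(y, (marks.count y : Int)), ⟨(hmem y _).mpr ⟨hy, rfl⟩, h1, h2⟩, rfl⟩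
  · exact hpB
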